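-- pv_equiv track=rewrite | github.com/themissellier/SUDOKU_pygame | SUDOKU_Themis_Sellier.py | convert_str_to_list
-- ===== SOURCE A (Python) =====
-- def convert_str_to_list(grille_str, taille):
--     """
--     Cette fonction permet de convertir la chaine de carcateres grille_str contenant un tableau à 2 dimensions en
--     tableau d'entiers. Elle prend en parametre la chaine de caracteres de la grille et la taille de celle-ci.
--     Elle retourne le tableau d'entiers à 2 dimensions.
--     """
--     # on initialise la nouvelle grille et les variables pour la boucle
--     grille = [[0 for i in range(taille)] for j in range(taille)]
--     nb_str = ""
--     pos = 0
--     # on parcourt la chaine de caracteres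
--     for i in range(len(grille_str)):
--         if grille_str[i] != "[" and grille_str[i] != "]" and grille_str[i] != ",":
--             nb_str += grille_str[i]
--         if grille_str[i] == ",":
--             grille[pos // taille][pos % taille] = int(nb_str)
--             nb_str = ""
--             pos += 1
--     # on entre les nombres dans la grille
--     grille[pos // taille][pos % taille] = int(nb_str)
--     # on retourne le tableau d'entiers
--     return grille
-- ===== SOURCE B (Python) =====
-- def convert_str_to_list(grille_str, taille):
--     tokens = "".join(c for c in grille_str if c not in "[]").split(",")
--     grille = [[0] * taille for _ in range(taille)]
--     for pos, s in enumerate(tokens):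
--         grille[pos // taille][pos % taille] = int(s)
--     return grille
-- ===== Notes on version B (the rewrite author's own statement) =====
-- stated objective: idiomatic
-- what changed: Replaced A's char-by-char accumulator/position state machine with a tokenize-then-fill decomposition: strip brackets, split the string on commas once, then place each token by its enumerate index.
import Mathlib
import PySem

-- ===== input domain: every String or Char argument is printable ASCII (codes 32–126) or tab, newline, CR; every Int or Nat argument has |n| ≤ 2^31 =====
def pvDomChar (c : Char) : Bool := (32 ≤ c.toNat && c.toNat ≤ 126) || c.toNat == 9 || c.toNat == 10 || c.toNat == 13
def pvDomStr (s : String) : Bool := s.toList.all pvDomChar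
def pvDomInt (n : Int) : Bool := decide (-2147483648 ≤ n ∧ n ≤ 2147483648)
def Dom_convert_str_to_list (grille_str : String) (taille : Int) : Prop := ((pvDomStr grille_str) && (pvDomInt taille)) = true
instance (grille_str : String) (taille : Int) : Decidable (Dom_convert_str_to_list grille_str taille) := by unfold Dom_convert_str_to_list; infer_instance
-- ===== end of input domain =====

-- B replaces A's char-by-char accumulator/delimiter state machine by tokenize (filter brackets,
-- split on commas) then fill with enumerate — idiomatic restructuring, same cost.


-- shared model of the Python statement `grille[r][c] = v` (r, c nonnegative and in range on
-- every admitted input; out of range Python raises, which Pre_ excludes, so the no-op branch is never claimed)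
def pySet2 (g : List (List Int)) (r c : Int) (v : Int) : List (List Int) :=
  if 0 ≤ r ∧ 0 ≤ c then
    match g[r.toNat]? with
    | some row => g.set r.toNat (row.set c.toNat v)
    | none => g
  else g

-- ===== PORT A =====
-- one step of A's for-loop over the characters; state = (grille, nb_str, pos)
def convAStep (taille : Int) (st : List (List Int) × List Char × Int) (c : Char) :
    List (List Int) × List Char × Int :=
  let nb' := if c ≠ '[' ∧ c ≠ ']' ∧ c ≠ ',' then st.2.1 ++ [c] else st.2.1
  if c = ',' then
    (pySet2 st.1 (PySem.Int.floordiv st.2.2 taille) (PySem.Int.mod st.2.2 taille)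
        ((PySem.Int.ofChars? nb').getD 0), [], st.2.2 + 1)
  else (st.1, nb', st.2.2)

def convert_str_to_list (grille_str : String) (taille : Int) : List (List Int) :=
  let grille := List.replicate taille.toNat (List.replicate taille.toNat 0)
  let st := grille_str.toList.foldl (convAStep taille) (grille, [], 0)
  pySet2 st.1 (PySem.Int.floordiv st.2.2 taille) (PySem.Int.mod st.2.2 taille)
    ((PySem.Int.ofChars? st.2.1).getD 0)

-- ===== PORT B =====
-- `"".join(c for c in grille_str if c not in "[]")` is the filtered character list; `.split(",")` is Chars.splitOn
def convert_str_to_list_alt (grille_str : String) (taille : Int) : List (List Int) :=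
  let tokens := PySem.Chars.splitOn (grille_str.toList.filter fun c => !(c == '[' || c == ']')) [',']
  let grille := List.replicate taille.toNat (List.replicate taille.toNat 0)
  (tokens.zipIdx).foldl
    (fun g p =>
      pySet2 g (PySem.Int.floordiv (p.2 : Int) taille) (PySem.Int.mod (p.2 : Int) taille)
        ((PySem.Int.ofChars? p.1).getD 0))
    grille

-- (first token, later tokens) of a character list, dropping brackets and splitting at commas
def toksF : List Char → List Char × List (List Char)
  | [] => ([], [])
  | c :: rest =>
      if c = '[' ∨ c = ']' then toksF rest
      else if c = ',' then ([], (toksF rest).1 :: (toksF rest).2)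
      else (c :: (toksF rest).1, (toksF rest).2)

-- ===== PRECONDITION & SPEC =====
-- Pre_ = exactly the inputs on which Python A returns: taille ≥ 1 (else ZeroDivisionError/IndexError
-- at the first write), every comma-separated token (brackets removed) parses with int()
-- (else ValueError), and the token count fits the taille×taille grid (else IndexError).
def Pre_convert_str_to_list (grille_str : String) (taille : Int) : Prop :=
  0 < taille ∧
  (let toks := (toksF grille_str.toList).1 :: (toksF grille_str.toList).2;
   ((toks.length : Int) ≤ taille ^ 2 ∧ ∀ tk ∈ toks, (PySem.Int.ofChars? tk).isSome))
instance (grille_str : String) (taille : Int) : Decidable (Pre_convert_str_to_list grille_str taille) := by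
  unfold Pre_convert_str_to_list; infer_instance

def pvWitness_convert_str_to_list : String × Int := ("[[1,2],[3,4]]", 2)

def Spec_convert_str_to_list (grille_str : String) (taille : Int) (out : List (List Int)) : Prop := out = convert_str_to_list_alt grille_str taille
instance (grille_str : String) (taille : Int) (out : List (List Int)) : Decidable (Spec_convert_str_to_list grille_str taille out) := by unfold Spec_convert_str_to_list; infer_instance

-- ===== CLAIM (what is proved, stated in full; the proofs are below) =====
def Claim_equal_convert_str_to_list : Prop := ∀ (grille_str : String) (taille : Int), Dom_convert_str_to_list grille_str taille → Pre_convert_str_to_list grille_str taille → Spec_convert_str_to_list grille_str taille (convert_str_to_list grille_str taille)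

-- ===== LEMMAS AND PROOFS =====

-- abstract writer loop: place the tokens `ts` at consecutive positions starting at `pos`
def fillFrom (t : Int) (g : List (List Int)) (pos : Int) : List (List Char) → List (List Int)
  | [] => g
  | tk :: ts =>
      fillFrom t
        (pySet2 g (PySem.Int.floordiv pos t) (PySem.Int.mod pos t) ((PySem.Int.ofChars? tk).getD 0))
        (pos + 1) ts

-- A's loop + final write = fillFrom over the token decomposition (nb is the pending prefix of the first token)
theorem convA_eq_fill (t : Int) (s : List Char) :
    ∀ (g : List (List Int)) (nb : List Char) (pos : Int),
      (fun st : List (List Int) × List Char × Int =>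
        pySet2 st.1 (PySem.Int.floordiv st.2.2 t) (PySem.Int.mod st.2.2 t)
          ((PySem.Int.ofChars? st.2.1).getD 0)) (s.foldl (convAStep t) (g, nb, pos))
      = fillFrom t g pos ((nb ++ (toksF s).1) :: (toksF s).2) := by
  induction s with
  | nil => intro g nb pos; simp [toksF, fillFrom]
  | cons c rest ih =>
    intro g nb pos
    by_cases hb : c = '[' ∨ c = ']'
    · have hstep : convAStep t (g, nb, pos) c = (g, nb, pos) := by
        rcases hb with hb | hb <;> subst hb <;> simp [convAStep]
      rw [List.foldl_cons, hstep, ih]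
      rcases hb with hb | hb <;> subst hb <;> simp [toksF]
    · by_cases hc : c = ','
      · subst hc
        have hstep : convAStep t (g, nb, pos) ','
            = (pySet2 g (PySem.Int.floordiv pos t) (PySem.Int.mod pos t)
                ((PySem.Int.ofChars? nb).getD 0), [], pos + 1) := by
          simp [convAStep]
        rw [List.foldl_cons, hstep, ih]
        simp [toksF, fillFrom]
      · have hb' : c ≠ '[' ∧ c ≠ ']' := by
          constructor <;> intro h <;> exact hb (by simp [h])
        have hstep : convAStep t (g, nb, pos) c = (g, nb ++ [c], pos) := by
          simp [convAStep, hb'.1, hb'.2, hc]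
        rw [List.foldl_cons, hstep, ih]
        simp [toksF, hb'.1, hb'.2, hc]

-- splitOn.go with one-character separator ',' and enough fuel computes toksF of a bracket-free list
theorem go_eq_toksF (l : List Char) :
    ∀ (fuel : Nat) (cur : List Char) (acc : List (List Char)),
      l.length < fuel → (∀ c ∈ l, c ≠ '[' ∧ c ≠ ']') →
      PySem.Chars.splitOn.go [','] fuel l cur acc
        = acc.reverse ++ (cur.reverse ++ (toksF l).1) :: (toksF l).2 := by
  induction l with
  | nil =>
    intro fuel cur acc hf _
    match fuel, hf with
    | fuel + 1, _ => simp [PySem.Chars.splitOn.go, toksF]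
  | cons c rest ih =>
    intro fuel cur acc hf hnb
    match fuel, hf with
    | fuel + 1, hf =>
      have hrest : rest.length < fuel := by simp at hf; omega
      have hnb' : ∀ x ∈ rest, x ≠ '[' ∧ x ≠ ']' := fun x hx => hnb x (List.mem_cons_of_mem _ hx)
      by_cases hc : c = ','
      · subst hc
        rw [PySem.Chars.splitOn.go]
        rw [show (if [','].isPrefixOf (',' :: rest) = true then
              PySem.Chars.splitOn.go [','] fuel (List.drop [','].length (',' :: rest)) [] (cur.reverse :: acc)
            else PySem.Chars.splitOn.go [','] fuel rest (',' :: cur) acc)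
          = PySem.Chars.splitOn.go [','] fuel rest [] (cur.reverse :: acc) from by
            rw [if_pos (by simp [List.isPrefixOf])]; rfl]
        rw [ih fuel [] (cur.reverse :: acc) hrest hnb']
        simp [toksF]
      · have hpre : [','].isPrefixOf (c :: rest) = false := by
          simp [List.isPrefixOf]; exact fun h => (hc h.symm).elim
        rw [PySem.Chars.splitOn.go, if_neg (by simp [hpre])]
        rw [ih fuel (c :: cur) acc hrest hnb']
        have hne : c ≠ '[' ∧ c ≠ ']' := hnb c List.mem_cons_self
        simp [toksF, hne.1, hne.2, hc]

theorem toksF_filter (l : List Char) :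
    toksF (l.filter fun c => !(c == '[' || c == ']')) = toksF l := by
  induction l with
  | nil => rfl
  | cons c rest ih =>
    by_cases hb : c = '[' ∨ c = ']'
    · rcases hb with hb | hb <;> subst hb <;> simpa [toksF] using ih
    · have hb' : c ≠ '[' ∧ c ≠ ']' := ⟨fun h => hb (Or.inl h), fun h => hb (Or.inr h)⟩
      simp only [Bool.not_or] at ih
      simp [toksF, hb'.1, hb'.2, ih]

theorem splitOn_filter_eq_toksF (l : List Char) :
    PySem.Chars.splitOn (l.filter fun c => !(c == '[' || c == ']')) [','] = (toksF l).1 :: (toksF l).2 := by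
  have hgo := go_eq_toksF (l.filter fun c => !(c == '[' || c == ']'))
      ((l.filter fun c => !(c == '[' || c == ']')).length + 1) [] [] (Nat.lt_succ_self _)
      (by intro c hc; have := List.of_mem_filter hc; simp at this; exact ⟨this.1, this.2⟩)
  rw [PySem.Chars.splitOn, hgo, toksF_filter]
  simp

-- B's enumerate loop = fillFrom
theorem zipIdx_foldl_eq_fill (t : Int) (ts : List (List Char)) :
    ∀ (n : Nat) (g : List (List Int)),
      (ts.zipIdx n).foldl
        (fun g p =>
          pySet2 g (PySem.Int.floordiv (p.2 : Int) t) (PySem.Int.mod (p.2 : Int) t)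
            ((PySem.Int.ofChars? p.1).getD 0)) g
      = fillFrom t g (n : Int) ts := by
  induction ts with
  | nil => intro n g; simp [fillFrom]
  | cons tk rest ih =>
    intro n g
    simp only [List.zipIdx_cons, List.foldl_cons, fillFrom, ih (n + 1)]
    norm_num

-- ===== VERDICT (by name: the statement is the Claim_ definition above) =====
theorem convert_str_to_list_spec : Claim_equal_convert_str_to_list := by
  intro grille_str taille _ _
  unfold Spec_convert_str_to_list convert_str_to_list convert_str_to_list_alt
  rw [splitOn_filter_eq_toksF, zipIdx_foldl_eq_fill]
  have := convA_eq_fill taille grille_str.toList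
      (List.replicate taille.toNat (List.replicate taille.toNat 0)) [] 0
  simpa using this
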